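-- pv_equiv track=rewrite | github.com/Climdyn/LayerCake | layercake/utils/symbolic_tensor.py | compute_jacobian_permutations
-- ===== SOURCE A (Python) =====
-- def compute_jacobian_permutations(shape):
--     """Return the axes permutations needed to compute the Jacobian tensor associated to the symbolic models tendencies' tensor.
--
--     Parameters
--     ----------
--     shape: tuple
--         The shape of the tendencies' tensor.
--
--     Returns
--     -------
--     list(list(int))
--         The list of permutations of the axes needed to compute the models Jacobian matrix.
--     """
--     n_perm = len(shape) - 2
--     permutations = list()
--     for i in range(1, n_perm+1):
--         perm = [0, i+1,]
--         perm += [j for j in range(2, i+1)]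
--         perm.append(1)
--         perm += [j for j in range(i+2, n_perm+2)]
--         permutations.append(perm)
--
--     return permutations
-- ===== SOURCE B (Python) =====
-- def compute_jacobian_permutations(shape):
--     n_perm = len(shape) - 2
--     return [[i + 1 if j == 1 else (1 if j == i + 1 else j)
--              for j in range(n_perm + 2)]
--             for i in range(1, n_perm + 1)]
-- ===== Notes on version B (the rewrite author's own statement) =====
-- stated objective: simpler
-- what changed: Each permutation is produced pointwise as the transposition map j -> (i+1 if j==1, 1 if j==i+1, else j) applied over range(n_perm+2) in a nested comprehension, instead of concatenating four list pieces per permutation in an accumulator loop.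
import Mathlib
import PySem

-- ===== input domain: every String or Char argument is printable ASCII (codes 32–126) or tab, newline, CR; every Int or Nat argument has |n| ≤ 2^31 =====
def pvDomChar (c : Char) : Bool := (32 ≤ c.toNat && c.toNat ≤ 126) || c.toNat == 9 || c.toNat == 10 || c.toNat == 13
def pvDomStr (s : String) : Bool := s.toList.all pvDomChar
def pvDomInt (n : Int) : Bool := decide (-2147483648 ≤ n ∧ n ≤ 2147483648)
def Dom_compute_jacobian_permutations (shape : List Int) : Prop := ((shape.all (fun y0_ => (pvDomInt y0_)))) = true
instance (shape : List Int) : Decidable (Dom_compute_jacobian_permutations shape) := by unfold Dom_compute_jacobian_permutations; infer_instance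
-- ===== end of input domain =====

-- B produces each permutation pointwise, mapping the transposition (1 ↔ i+1) over the index
-- range, instead of concatenating four list pieces per permutation; simpler, same cost.
-- ===== PORT A =====
def compute_jacobian_permutations (shape : List Int) : List (List Int) :=
  let n_perm : Int := (shape.length : Int) - 2
  (PySem.List.pyRange 1 (n_perm + 1) 1).foldl (fun permutations i =>
    permutations ++
      [[0, i + 1] ++ PySem.List.pyRange 2 (i + 1) 1 ++ [1] ++
        PySem.List.pyRange (i + 2) (n_perm + 2) 1]) []

-- ===== PORT B =====
def compute_jacobian_permutations_alt (shape : List Int) : List (List Int) :=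
  let n_perm : Int := (shape.length : Int) - 2
  (PySem.List.pyRange 1 (n_perm + 1) 1).map (fun i =>
    (PySem.List.pyRange 0 (n_perm + 2) 1).map (fun j =>
      if j = 1 then i + 1 else if j = i + 1 then 1 else j))

-- ===== PRECONDITION & SPEC =====
def Spec_compute_jacobian_permutations (shape : List Int) (out : List (List Int)) : Prop := out = compute_jacobian_permutations_alt shape
instance (shape : List Int) (out : List (List Int)) : Decidable (Spec_compute_jacobian_permutations shape out) := by unfold Spec_compute_jacobian_permutations; infer_instance

-- ===== CLAIM (what is proved, stated in full; the proofs are below) =====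
def Claim_equal_compute_jacobian_permutations : Prop := ∀ (shape : List Int), Dom_compute_jacobian_permutations shape → Spec_compute_jacobian_permutations shape (compute_jacobian_permutations shape)

-- ===== LEMMAS AND PROOFS =====

-- the identity list 0..n+1, split around the two swapped positions
lemma base_split (n i : Int) (h1 : 1 ≤ i) (h2 : i < n + 1) :
    PySem.List.pyRange 0 (n + 2) 1
      = 0 :: 1 :: (PySem.List.pyRange 2 (i + 1) 1 ++ (i + 1) :: PySem.List.pyRange (i + 2) (n + 2) 1) := by
  rw [PySem.List.pyRange_one_cons (by omega), PySem.List.pyRange_one_cons (by omega),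
    PySem.List.pyRange_one_append (0 + 1 + 1) (i + 1) (n + 2) (by omega) (by omega),
    PySem.List.pyRange_one_cons (a := i + 1) (by omega),
    show i + 1 + 1 = i + 2 from by ring]
  norm_num

-- mapping B's transposition over the identity range yields A's concatenated permutation
lemma map_swap_eq (n i : Int) (h1 : 1 ≤ i) (h2 : i < n + 1) :
    (PySem.List.pyRange 0 (n + 2) 1).map
        (fun j => if j = 1 then i + 1 else if j = i + 1 then 1 else j)
      = [0, i + 1] ++ PySem.List.pyRange 2 (i + 1) 1 ++ [1] ++ PySem.List.pyRange (i + 2) (n + 2) 1 := by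
  rw [base_split n i h1 h2]
  simp only [List.map_cons, List.map_append]
  rw [List.map_congr_left (l := PySem.List.pyRange 2 (i + 1) 1) (g := id) ?_,
    List.map_congr_left (l := PySem.List.pyRange (i + 2) (n + 2) 1) (g := id) ?_]
  · simp [show i + 1 ≠ 1 by omega, show (0:Int) ≠ 1 by norm_num, show (0:Int) ≠ i + 1 by omega]
  · intro j hj
    rw [PySem.List.mem_pyRange_one] at hj
    simp only [id]
    rw [if_neg (by omega), if_neg (by omega)]
  · intro j hj
    rw [PySem.List.mem_pyRange_one] at hj
    simp only [id]
    rw [if_neg (by omega), if_neg (by omega)]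

-- ===== VERDICT (by name: the statement is the Claim_ definition above) =====
theorem compute_jacobian_permutations_spec : Claim_equal_compute_jacobian_permutations := by
  intro shape _
  unfold Spec_compute_jacobian_permutations compute_jacobian_permutations compute_jacobian_permutations_alt
  rw [PySem.List.foldl_append_singleton_eq_map]
  refine List.map_congr_left ?_
  intro i hi
  rw [PySem.List.mem_pyRange_one] at hi
  rw [map_swap_eq _ i hi.1 (by omega)]
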